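-- pv_equiv track=rewrite | github.com/spadix0/AoC2020 | 17/cubes.py | cache_dirs
-- ===== SOURCE A (Python) =====
-- from operator import or_
-- from functools import reduce
-- from itertools import product
--
-- B = 32			# bits / component -1 for separation
--
-- M = (1 << B-1) - 1	# component mask
--
-- def cache_dirs(dims):
--     axes = (
--         ((-1 & M) << B*i, 0, 1 << B*i)
--         for i in range(dims)
--     )
--
--     return tuple(
--         reduce(or_, dp)
--         for dp in product(*axes)
--         if any(u for u in dp)
--     )
-- ===== SOURCE B (Python) =====
-- B = 32			# bits / component -1 for separation
--
-- M = (1 << B-1) - 1	# component mask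
--
-- def cache_dirs(dims):
--     # count offsets by integer index n in range(3**dims); decode base-3 digits
--     # (dim 0 most significant) into packed components; skip the all-zero center.
--     total = 1
--     for _ in range(dims):
--         total *= 3
--     center = (total - 1) // 2
--
--     def decode(n, ndims):
--         if ndims <= 0:
--             return 0
--         q, r = divmod(n, 3)
--         if r == 0:
--             comp = (-1 & M) << B*(ndims-1)
--         elif r == 1:
--             comp = 0
--         else:
--             comp = 1 << B*(ndims-1)
--         return decode(q, ndims-1) | comp
--
--     return tuple(decode(n, dims) for n in range(total) if n != center)
-- ===== Notes on version B (the rewrite author's own statement) =====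
-- stated objective: alternative
-- what changed: Replaces itertools.product over per-dimension axis generators plus reduce(or_) with direct counting: iterate integer indices 0..3**dims-1, decode each index's base-3 digits (dim 0 most significant) recursively into packed components, and skip the single center index (the all-zero offset) instead of filtering tuples with any().
import Mathlib
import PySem

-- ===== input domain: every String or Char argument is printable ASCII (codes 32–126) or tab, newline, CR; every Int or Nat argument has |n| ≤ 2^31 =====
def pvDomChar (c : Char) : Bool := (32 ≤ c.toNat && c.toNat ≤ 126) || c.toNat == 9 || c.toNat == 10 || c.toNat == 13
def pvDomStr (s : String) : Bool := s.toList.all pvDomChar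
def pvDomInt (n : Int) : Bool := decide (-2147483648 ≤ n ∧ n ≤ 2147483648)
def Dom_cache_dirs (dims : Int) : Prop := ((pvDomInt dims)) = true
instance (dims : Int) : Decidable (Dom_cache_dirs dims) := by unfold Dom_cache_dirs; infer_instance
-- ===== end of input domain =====

-- B replaces the itertools.product/reduce(or_) enumeration by counting integer
-- indices 0..3**dims-1 and decoding their base-3 digits into packed offsets,
-- skipping the single all-zero center index (alternative algorithm, same cost).


-- ===== PORT A =====
-- module constant M = (1 << B-1) - 1 with B = 32
def pvM : Int := (1 <<< (31 : Nat)) - 1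

-- axes = (((-1 & M) << B*i, 0, 1 << B*i) for i in range(dims))
-- (every i from range(dims) is nonnegative, so the .toNat on the shift amount is exact)
def pvAxes (dims : Int) : List (List Int) :=
  (PySem.List.pyRange 0 dims 1).map (fun i =>
    [PySem.Int.band (-1) pvM <<< (32 * i).toNat, 0, 1 <<< (32 * i).toNat])

-- itertools.product(*axes): the first axis varies slowest
def pyProduct : List (List Int) → List (List Int)
  | [] => [[]]
  | x :: xs => x.flatMap (fun a => (pyProduct xs).map (fun dp => a :: dp))

-- reduce(or_, dp); the [] case is unreachable (an empty dp fails the 'if any(...)' filter first)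
def reduceOr : List Int → Int
  | [] => 0
  | h :: t => t.foldl PySem.Int.bor h

def cache_dirs (dims : Int) : List Int :=
  ((pyProduct (pvAxes dims)).filter (fun dp => dp.any (fun u => u != 0))).map reduceOr

-- ===== PORT B =====
-- decode(n, ndims): base-3 digits of index n (dim 0 most significant) -> packed offset
def altDecode (n ndims : Int) : Int :=
  if _h : ndims ≤ 0 then 0
  else
    let q := PySem.Int.floordiv n 3
    let r := PySem.Int.mod n 3
    let comp :=
      if r = 0 then PySem.Int.band (-1) pvM <<< (32 * (ndims - 1)).toNat
      else if r = 1 then (0 : Int)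
      else 1 <<< (32 * (ndims - 1)).toNat
    PySem.Int.bor (altDecode q (ndims - 1)) comp
termination_by ndims.toNat
decreasing_by omega

def cache_dirs_alt (dims : Int) : List Int :=
  let total := (PySem.List.pyRange 0 dims 1).foldl (fun t _ => t * 3) 1
  let center := PySem.Int.floordiv (total - 1) 2
  ((PySem.List.pyRange 0 total 1).filter (fun n => n != center)).map (fun n => altDecode n dims)

-- ===== PRECONDITION & SPEC =====
def Spec_cache_dirs (dims : Int) (out : List Int) : Prop := out = cache_dirs_alt dims
instance (dims : Int) (out : List Int) : Decidable (Spec_cache_dirs dims out) := by unfold Spec_cache_dirs; infer_instance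

-- ===== CLAIM (what is proved, stated in full; the proofs are below) =====
def Claim_equal_cache_dirs : Prop := ∀ (dims : Int), Dom_cache_dirs dims → Spec_cache_dirs dims (cache_dirs dims)

-- ===== LEMMAS AND PROOFS =====

lemma pv_nat_or_zero (m n : Nat) : m ||| n = 0 ↔ m = 0 ∧ n = 0 := by
  constructor
  · intro h
    have h1 : m ≤ m ||| n := Nat.left_le_or
    have h2 : n ≤ m ||| n := Nat.right_le_or
    omega
  · rintro ⟨rfl, rfl⟩; rfl

lemma pv_bor_eq_zero_iff (a b : Int) : PySem.Int.bor a b = 0 ↔ a = 0 ∧ b = 0 := by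
  unfold PySem.Int.bor
  split_ifs with h1 h2 h3
  · rw [show ((↑(a.toNat ||| b.toNat) : Int) = 0 ↔ a.toNat ||| b.toNat = 0) by omega, pv_nat_or_zero]
    omega
  · omega
  · omega
  · omega

lemma pv_zero_bor (a : Int) : PySem.Int.bor 0 a = a := by
  unfold PySem.Int.bor
  split_ifs with h1 h2 h3
  · simp; omega
  · simp; omega
  · omega
  · omega

lemma pv_reduceOr_append (dp : List Int) (a : Int) :
    reduceOr (dp ++ [a]) = PySem.Int.bor (reduceOr dp) a := by
  cases dp with
  | nil => simp [reduceOr, pv_zero_bor]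
  | cons h t => simp [reduceOr, List.foldl_append]

lemma pv_foldl_bor_zero (t : List Int) :
    ∀ h : Int, t.foldl PySem.Int.bor h = 0 ↔ h = 0 ∧ ∀ u ∈ t, u = 0 := by
  induction t with
  | nil => simp
  | cons x t ih =>
    intro h
    simp only [List.foldl_cons, ih, pv_bor_eq_zero_iff, List.mem_cons]
    constructor
    · rintro ⟨⟨h1, h2⟩, h3⟩
      exact ⟨h1, fun u hu => by rcases hu with rfl | hu; exact h2; exact h3 u hu⟩
    · rintro ⟨h1, h2⟩
      exact ⟨⟨h1, h2 x (Or.inl rfl)⟩, fun u hu => h2 u (Or.inr hu)⟩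

lemma pv_reduceOr_eq_zero (dp : List Int) : reduceOr dp = 0 ↔ ∀ u ∈ dp, u = 0 := by
  cases dp with
  | nil => simp [reduceOr]
  | cons h t =>
    simp only [reduceOr, pv_foldl_bor_zero, List.mem_cons]
    constructor
    · rintro ⟨h1, h2⟩ u hu; rcases hu with rfl | hu; exact h1; exact h2 u hu
    · intro hz; exact ⟨hz h (Or.inl rfl), fun u hu => hz u (Or.inr hu)⟩

lemma pv_prod_append (l : List (List Int)) (ys : List Int) :
    pyProduct (l ++ [ys]) = (pyProduct l).flatMap (fun dp => ys.map (fun a => dp ++ [a])) := by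
  induction l with
  | nil =>
    show List.flatMap (fun a => [[a]]) ys = List.flatMap (fun dp => ys.map (fun a => dp ++ [a])) [[]]
    simp only [List.flatMap_cons, List.flatMap_nil, List.append_nil, List.nil_append]
    induction ys with
    | nil => rfl
    | cons y t ihy => simp_all [List.flatMap_cons]
  | cons x xs ih =>
    simp only [List.cons_append, pyProduct, ih, List.map_flatMap, List.flatMap_assoc,
      List.flatMap_map, List.map_map]
    simp only [Function.comp_def]

-- the three component values contributed by digit r at dimension index d
def pvComp (r d : Nat) : Int :=
  if (r : Int) = 0 then PySem.Int.band (-1) pvM <<< (32 * (d : Int)).toNat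
  else if (r : Int) = 1 then 0
  else 1 <<< (32 * (d : Int)).toNat

lemma pv_axes_succ (d : Nat) :
    pvAxes ((d + 1 : Nat) : Int) = pvAxes (d : Int) ++ [[pvComp 0 d, pvComp 1 d, pvComp 2 d]] := by
  unfold pvAxes pvComp
  rw [show ((d + 1 : Nat) : Int) = (d : Int) + 1 by push_cast; ring,
      PySem.List.pyRange_one_succ_right (by omega)]
  rw [List.map_append]
  norm_num
  rw [show (32 * (d : Int)) = ((32 * d : Nat) : Int) by push_cast; ring,
      Int.shiftLeft_natCast_right,
      show (((32 * d : Nat) : Int)).toNat = 32 * d by omega]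

lemma pv_decode_step (d q r : Nat) (hr : r < 3) :
    altDecode ((3 * q + r : Nat) : Int) ((d + 1 : Nat) : Int) =
      PySem.Int.bor (altDecode (q : Nat) (d : Int)) (pvComp r d) := by
  rw [altDecode]
  rw [dif_neg (by omega : ¬ ((d + 1 : Nat) : Int) ≤ 0)]
  have hq : PySem.Int.floordiv ((3 * q + r : Nat) : Int) 3 = (q : Int) := by
    rw [show ((3 : Int)) = ((3 : Nat) : Int) by norm_num, PySem.Int.floordiv_natCast]
    congr 1
    omega
  have hm : PySem.Int.mod ((3 * q + r : Nat) : Int) 3 = (r : Int) := by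
    rw [show ((3 : Int)) = ((3 : Nat) : Int) by norm_num, PySem.Int.mod_natCast]
    congr 1
    omega
  have hd : ((d + 1 : Nat) : Int) - 1 = (d : Int) := by push_cast; ring
  simp only [hq, hm, hd]
  rfl

lemma pv_comp_eq_zero (r d : Nat) (hr : r < 3) : pvComp r d = 0 ↔ r = 1 := by
  unfold pvComp
  interval_cases r
  · norm_num
    decide
  · norm_num
  · norm_num

def pvCenter (d : Nat) : Nat := (3 ^ d - 1) / 2

lemma pv_pow_odd (d : Nat) : 3 ^ d % 2 = 1 := by
  induction d with
  | zero => rfl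
  | succ d ih => rw [pow_succ]; omega

lemma pv_center_succ (d : Nat) : pvCenter (d + 1) = 3 * pvCenter d + 1 := by
  unfold pvCenter
  have h1 := pv_pow_odd d
  rw [pow_succ]
  omega

lemma pv_decode_dims_zero (n : Int) : altDecode n 0 = 0 := by
  rw [altDecode]
  norm_num

lemma pv_decode_zero_iff (d : Nat) :
    ∀ n : Nat, n < 3 ^ d → (altDecode (n : Int) (d : Int) = 0 ↔ n = pvCenter d) := by
  induction d with
  | zero =>
    intro n hn
    interval_cases n
    simp [pv_decode_dims_zero, pvCenter]
  | succ d ih =>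
    intro n hn
    have hq : n / 3 < 3 ^ d := by
      rw [pow_succ] at hn
      omega
    have hstep := pv_decode_step d (n / 3) (n % 3) (Nat.mod_lt n (by norm_num))
    rw [show 3 * (n / 3) + n % 3 = n from by omega] at hstep
    rw [show ((d + 1 : Nat) : Int) = ((d : Nat) : Int) + 1 from by push_cast; ring] at hstep ⊢
    rw [hstep, pv_bor_eq_zero_iff, ih (n / 3) hq,
        pv_comp_eq_zero _ _ (Nat.mod_lt n (by norm_num)), pv_center_succ]
    omega

lemma pv_total_fold (l : List Int) (init : Int) :
    l.foldl (fun t _ => t * 3) init = init * 3 ^ l.length := by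
  induction l generalizing init with
  | nil => simp
  | cons x xs ih => simp [ih, pow_succ]; ring

lemma pv_total_eq (d : Nat) :
    (PySem.List.pyRange 0 (d : Int) 1).foldl (fun t _ => t * 3) 1 = ((3 ^ d : Nat) : Int) := by
  rw [pv_total_fold]
  simp [PySem.List.length_pyRange_one]

lemma pv_range_flat (k : Nat) :
    List.range (3 * k) = (List.range k).flatMap (fun q => [3 * q, 3 * q + 1, 3 * q + 2]) := by
  induction k with
  | zero => simp
  | succ k ih =>
    rw [show 3 * (k + 1) = 3 * k + 1 + 1 + 1 by ring]
    rw [List.range_succ, List.range_succ, List.range_succ, ih, List.range_succ]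
    simp

lemma pv_main (d : Nat) :
    (List.range (3 ^ d)).map (fun n : Nat => altDecode (n : Int) (d : Int)) =
      (pyProduct (pvAxes (d : Int))).map reduceOr := by
  induction d with
  | zero =>
    have h : pvAxes ((0 : Nat) : Int) = [] := by
      unfold pvAxes
      rw [show ((0 : Nat) : Int) = 0 by norm_num, PySem.List.pyRange_one_eq_nil (by omega)]
      rfl
    rw [h]
    show (List.range 1).map (fun n : Nat => altDecode (n : Int) ((0 : Nat) : Int)) = List.map reduceOr (pyProduct [])
    simp [List.range_succ, pyProduct, reduceOr, pv_decode_dims_zero]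
  | succ d ih =>
    rw [show (3 : Nat) ^ (d + 1) = 3 * 3 ^ d from by rw [pow_succ]; ring,
        pv_range_flat, List.map_flatMap, pv_axes_succ, pv_prod_append, List.map_flatMap]
    have hL : ∀ q : Nat,
        ([3 * q, 3 * q + 1, 3 * q + 2].map (fun n : Nat => altDecode (n : Int) ((d + 1 : Nat) : Int)))
          = [PySem.Int.bor (altDecode (q : Nat) (d : Int)) (pvComp 0 d),
             PySem.Int.bor (altDecode (q : Nat) (d : Int)) (pvComp 1 d),
             PySem.Int.bor (altDecode (q : Nat) (d : Int)) (pvComp 2 d)] := by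
      intro q
      have h0 := pv_decode_step d q 0 (by norm_num)
      have h1 := pv_decode_step d q 1 (by norm_num)
      have h2 := pv_decode_step d q 2 (by norm_num)
      rw [Nat.add_zero] at h0
      simp only [List.map_cons, List.map_nil, h0, h1, h2]
    have hR : ∀ dp : List Int,
        (([pvComp 0 d, pvComp 1 d, pvComp 2 d].map (fun a => dp ++ [a])).map reduceOr)
          = [PySem.Int.bor (reduceOr dp) (pvComp 0 d),
             PySem.Int.bor (reduceOr dp) (pvComp 1 d),
             PySem.Int.bor (reduceOr dp) (pvComp 2 d)] := by
      intro dp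
      simp [pv_reduceOr_append]
    simp only [hL, hR]
    rw [← List.flatMap_map (fun n : Nat => altDecode (n : Int) (d : Int))
          (fun x => [PySem.Int.bor x (pvComp 0 d), PySem.Int.bor x (pvComp 1 d),
                     PySem.Int.bor x (pvComp 2 d)]),
        ih, List.flatMap_map]

lemma pv_map_filter {α β : Type} (f : α → β) (p : α → Bool) (q : β → Bool) :
    ∀ l : List α, (∀ x ∈ l, q (f x) = p x) → (l.filter p).map f = (l.map f).filter q := by
  intro l
  induction l with
  | nil => simp
  | cons x xs ih =>
    intro h
    have hx := h x (List.mem_cons_self)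
    have ihx := ih (fun y hy => h y (List.mem_cons_of_mem _ hy))
    cases hpx : p x <;> simp [List.map_cons, hx, hpx, ihx]

lemma pv_any_eq (dp : List Int) : (dp.any (fun u => u != 0)) = ((reduceOr dp) != 0) := by
  rw [Bool.eq_iff_iff]
  simp only [List.any_eq_true, bne_iff_ne, ne_eq, pv_reduceOr_eq_zero]
  push_neg
  rfl

theorem cache_dirs_eq (dims : Int) : cache_dirs dims = cache_dirs_alt dims := by
  cases dims with
  | ofNat d =>
    show cache_dirs (d : Int) = cache_dirs_alt (d : Int)
    have hB0 : cache_dirs_alt (d : Int) =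
        ((PySem.List.pyRange 0 ((PySem.List.pyRange 0 (d : Int) 1).foldl (fun t _ => t * 3) 1) 1).filter
            (fun n => n != PySem.Int.floordiv ((PySem.List.pyRange 0 (d : Int) 1).foldl (fun t _ => t * 3) 1 - 1) 2)).map
          (fun n => altDecode n (d : Int)) := rfl
    unfold cache_dirs
    rw [hB0, pv_total_eq]
    rw [pv_map_filter reduceOr (fun dp => dp.any (fun u => u != 0)) (fun v => v != 0)
          _ (fun dp _ => (pv_any_eq dp).symm)]
    rw [PySem.List.pyRange_one]
    have hone : ((3 ^ d : Nat) : Int) - 1 = ((3 ^ d - 1 : Nat) : Int) := by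
      have : 1 ≤ 3 ^ d := Nat.one_le_pow _ _ (by norm_num)
      omega
    have hcen : PySem.Int.floordiv (((3 ^ d : Nat) : Int) - 1) 2 = ((pvCenter d : Nat) : Int) := by
      rw [hone, show (2 : Int) = ((2 : Nat) : Int) by norm_num, PySem.Int.floordiv_natCast]
      rfl
    rw [hcen]
    have hmap : (List.map (fun k : Nat => (0 : Int) + (k : Int)) (List.range ((((3 ^ d : Nat) : Int)) - 0).toNat))
        = (List.range (3 ^ d)).map (fun k : Nat => (k : Int)) := by
      rw [show (((3 ^ d : Nat) : Int) - 0) = ((3 ^ d : Nat) : Int) from by ring]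
      rw [Int.toNat_natCast]
      simp only [zero_add]
    rw [hmap]
    rw [← pv_map_filter (fun k : Nat => (k : Int))
          (fun k => k != pvCenter d) (fun n => n != ((pvCenter d : Nat) : Int))
          _ (fun k _ => by rw [Bool.eq_iff_iff]; simp [bne_iff_ne, Nat.cast_inj])]
    rw [List.map_map]
    simp only [Function.comp_def]
    rw [pv_map_filter (fun k : Nat => altDecode (k : Int) (d : Int))
          (fun k => k != pvCenter d) (fun v => v != 0)
          _ (fun k hk => by
            have hzi := pv_decode_zero_iff d k (List.mem_range.mp hk)
            rw [Bool.eq_iff_iff]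
            simp [bne_iff_ne, hzi])]
    rw [pv_main]
  | negSucc d =>
    have hnil : PySem.List.pyRange 0 (Int.negSucc d) 1 = [] :=
      PySem.List.pyRange_one_eq_nil (by omega)
    have hA : cache_dirs (Int.negSucc d) = [] := by
      unfold cache_dirs pvAxes
      rw [hnil]
      rfl
    have hB : cache_dirs_alt (Int.negSucc d) = [] := by
      unfold cache_dirs_alt
      rw [hnil]
      rfl
    rw [hA, hB]

-- ===== VERDICT (by name: the statement is the Claim_ definition above) =====
theorem cache_dirs_spec : Claim_equal_cache_dirs := by
  intro dims _
  exact cache_dirs_eq dims
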